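-- pv_equiv track=rewrite | github.com/kaivalyakate/Python-Interview-Repo | InterviewPreparation/AmazonPrep/amz/newYearOAMinKItemPriceThreshold.py | reduceGifts
-- ===== SOURCE A (Python) =====
-- from heapq import heappush, heappop
--
-- def reduceGifts(prices: list[int], k: int, threshold: int) -> int:
--     if len(prices) < k:
--         return -1
--     min_items = -1
--     pq = []
--     running_sum = 0
--     for price in prices:
--         if len(pq) >= k:
--             if running_sum > threshold:
--                 min_items += 1
--             running_sum -= heappop(pq)
--         running_sum += price
--         heappush(pq, price)
--     if running_sum > threshold:
--         min_items += 1
--     return min_items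
-- ===== SOURCE B (Python) =====
-- def reduceGifts(prices: list[int], k: int, threshold: int) -> int:
--     n = len(prices)
--     if n < k:
--         return -1
--     # retained elements kept as an ascending sorted list; evict = pop the head
--     kept = sorted(prices[:k])
--     s = sum(kept)
--     sums = [s]
--     for p in prices[k:]:
--         m = kept.pop(0)          # current minimum is the head
--         s += p - m
--         i = 0                    # find insertion point keeping kept ascending
--         while i < len(kept) and kept[i] < p:
--             i += 1
--         kept.insert(i, p)
--         sums.append(s)
--     return sum(1 for v in sums if v > threshold) - 1
-- ===== Notes on version B (the rewrite author's own statement) =====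
-- stated objective: alternative
-- what changed: Replaces the min-heap sliding process by an ascending sorted list (sorted k-prefix init, evict = pop head, linear sorted insertion) and replaces A's stateful -1-initialised counter by collecting the running sums of every checked step and counting the threshold crossings at the end.
import Mathlib
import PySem

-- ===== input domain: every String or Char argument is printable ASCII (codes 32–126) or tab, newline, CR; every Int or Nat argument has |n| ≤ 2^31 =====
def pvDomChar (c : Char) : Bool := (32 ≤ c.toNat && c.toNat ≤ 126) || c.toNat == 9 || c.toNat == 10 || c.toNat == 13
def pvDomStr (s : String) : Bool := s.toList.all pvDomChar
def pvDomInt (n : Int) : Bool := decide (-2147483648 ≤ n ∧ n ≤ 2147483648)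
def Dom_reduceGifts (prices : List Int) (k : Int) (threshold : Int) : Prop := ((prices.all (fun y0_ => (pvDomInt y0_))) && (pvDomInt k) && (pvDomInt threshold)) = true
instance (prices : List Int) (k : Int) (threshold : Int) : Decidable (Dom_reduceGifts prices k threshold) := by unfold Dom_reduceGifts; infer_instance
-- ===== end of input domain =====

-- B replaces A's min-heap sliding process by an ascending sorted list (sorted k-prefix
-- init, evict = pop head, sorted insertion) and counts threshold crossings from the
-- collected step sums instead of A's stateful counter; equal return value on Pre_.


-- ===== PORT A =====
-- A's `pq` is a heapq min-heap whose internal array order is unobservable through A's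
-- code (only len(pq) and heappop's return value are used), so it is ported as the plain
-- list of pushed-not-yet-popped elements: heappush = append, heappop = remove the
-- minimum value (exact for Int elements).  heappop([]) raises IndexError — those
-- inputs (nonempty prices with k ≤ 0) are excluded by Pre_reduceGifts.
def reduceGiftsStep (k threshold : Int) (st : Int × List Int × Int) (price : Int) : Int × List Int × Int :=
  let mi := st.1
  let pq := st.2.1
  let s := st.2.2
  if k ≤ (pq.length : Int) then
    let mi := if threshold < s then mi + 1 else mi
    let m := (PySem.List.min? pq (fun x => x)).getD 0
    let pq := (PySem.List.remove? pq m).getD pq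
    let s := s - m
    (mi, pq ++ [price], s + price)
  else
    (mi, pq ++ [price], s + price)

def reduceGifts (prices : List Int) (k : Int) (threshold : Int) : Int :=
  if (prices.length : Int) < k then -1
  else
    let st := prices.foldl (reduceGiftsStep k threshold) (-1, ([] : List Int), 0)
    if threshold < st.2.2 then st.1 + 1 else st.1

-- ===== PORT B =====
-- Source B's while-loop insertion of p into the ascending list `kept`
def insertAsc : List Int → Int → List Int
  | [], p => [p]
  | x :: xs, p => if x < p then x :: insertAsc xs p else p :: x :: xs

def reduceGiftsAltStep (st : List Int × Int × List Int) (p : Int) : List Int × Int × List Int :=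
  match st.1 with
  | [] => st        -- kept.pop(0) on [] raises IndexError — excluded by Pre_reduceGifts
  | m :: rest =>
      let s := st.2.1 + p - m
      (insertAsc rest p, s, st.2.2 ++ [s])

def reduceGifts_alt (prices : List Int) (k : Int) (threshold : Int) : Int :=
  if (prices.length : Int) < k then -1
  else
    let kept := PySem.List.sorted (PySem.List.slice prices none (some k)) (fun x => x) false
    let s := kept.sum
    let st := (PySem.List.slice prices (some k) none).foldl reduceGiftsAltStep (kept, s, [s])
    ((st.2.2.countP (fun v => threshold < v)) : Int) - 1

-- ===== PRECONDITION & SPEC =====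
-- Pre_ excludes exactly the inputs where A raises: with nonempty prices and k ≤ 0,
-- A's first iteration pops from the empty heap (IndexError).
def Pre_reduceGifts (prices : List Int) (k : Int) (threshold : Int) : Prop :=
  prices = [] ∨ 1 ≤ k
instance (prices : List Int) (k : Int) (threshold : Int) : Decidable (Pre_reduceGifts prices k threshold) := by unfold Pre_reduceGifts; infer_instance

def pvWitness_reduceGifts : List Int × Int × Int := ([3, 1, 4, 2], 2, 5)

def Spec_reduceGifts (prices : List Int) (k : Int) (threshold : Int) (out : Int) : Prop := out = reduceGifts_alt prices k threshold
instance (prices : List Int) (k : Int) (threshold : Int) (out : Int) : Decidable (Spec_reduceGifts prices k threshold out) := by unfold Spec_reduceGifts; infer_instance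

-- ===== CLAIM (what is proved, stated in full; the proofs are below) =====
def Claim_equal_reduceGifts : Prop := ∀ (prices : List Int) (k : Int) (threshold : Int), Dom_reduceGifts prices k threshold → Pre_reduceGifts prices k threshold → Spec_reduceGifts prices k threshold (reduceGifts prices k threshold)

-- ===== LEMMAS AND PROOFS =====

lemma insertAsc_perm (xs : List Int) (p : Int) : (insertAsc xs p).Perm (p :: xs) := by
  induction xs with
  | nil => simp [insertAsc]
  | cons x xs ih =>
      simp only [insertAsc]
      split
      · exact ((ih.cons x).trans (List.Perm.swap p x xs))
      · exact List.Perm.refl _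

lemma insertAsc_pairwise (xs : List Int) (p : Int) (h : xs.Pairwise (· ≤ ·)) :
    (insertAsc xs p).Pairwise (· ≤ ·) := by
  induction xs with
  | nil => simp [insertAsc]
  | cons x xs ih =>
      rcases List.pairwise_cons.mp h with ⟨hx, hxs⟩
      simp only [insertAsc]
      split
      · rename_i hlt
        refine List.pairwise_cons.mpr ⟨?_, ih hxs⟩
        intro y hy
        rcases List.mem_cons.mp ((insertAsc_perm xs p).mem_iff.mp hy) with hy | hy
        · subst hy; omega
        · exact hx y hy
      · rename_i hge
        refine List.pairwise_cons.mpr ⟨?_, h⟩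
        intro y hy
        rcases List.mem_cons.mp hy with hy | hy
        · subst hy; omega
        · exact le_trans (by omega) (hx y hy)

lemma fillA (k threshold : Int) :
    ∀ (F : List Int) (mi s : Int) (pq : List Int),
      ((pq.length : Int) + (F.length : Int) ≤ k) →
      F.foldl (reduceGiftsStep k threshold) (mi, pq, s) = (mi, pq ++ F, s + F.sum) := by
  intro F
  induction F with
  | nil => intro mi s pq _; simp
  | cons p F ih =>
      intro mi s pq hlen
      have hcond : ¬ (k ≤ (pq.length : Int)) := by
        simp only [List.length_cons] at hlen; push_cast at hlen ⊢; omega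
      simp only [List.foldl_cons, reduceGiftsStep, if_neg hcond]
      rw [ih mi (s + p) (pq ++ [p]) (by simp only [List.length_append, List.length_cons, List.length_nil] at hlen ⊢; push_cast at hlen ⊢; omega)]
      simp [List.sum_cons]
      ring_nf

lemma phase2 (k threshold : Int) :
    ∀ (R : List Int) (kept pq : List Int) (mi s : Int) (init : List Int),
      kept.Perm pq → kept.Pairwise (· ≤ ·) → ((kept.length : Int) = k) → 1 ≤ k →
      mi = (init.countP (fun v => decide (threshold < v)) : Int) - 1 →
      (if threshold < (R.foldl (reduceGiftsStep k threshold) (mi, pq, s)).2.2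
         then (R.foldl (reduceGiftsStep k threshold) (mi, pq, s)).1 + 1
         else (R.foldl (reduceGiftsStep k threshold) (mi, pq, s)).1)
      = ((R.foldl reduceGiftsAltStep (kept, s, init ++ [s])).2.2.countP (fun v => decide (threshold < v)) : Int) - 1 := by
  intro R
  induction R with
  | nil =>
      intro kept pq mi s init hperm hpw hlen hk hmi
      simp only [List.foldl_nil]
      rw [List.countP_append]
      by_cases hs : threshold < s
      · simp [hs, hmi]
      · simp [hs, hmi]
  | cons p R ih =>
      intro kept pq mi s init hperm hpw hlen hk hmi
      -- kept is nonempty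
      obtain ⟨m, rest, hkm⟩ : ∃ m rest, kept = m :: rest := by
        cases kept with
        | nil => exfalso; simp at hlen; omega
        | cons a t => exact ⟨a, t, rfl⟩
      subst hkm
      have hpqlen : (pq.length : Int) = k := by rw [← hperm.length_eq]; exact hlen
      have hcond : k ≤ (pq.length : Int) := by omega
      -- the popped minimum is the head of the sorted permutation
      have hpqne : pq ≠ [] := by
        intro h; subst h; simp at hpqlen; omega
      obtain ⟨v, hv⟩ : ∃ v, PySem.List.min? pq (fun x => x) = some v := by
        cases pq with
        | nil => exact absurd rfl hpqne
        | cons a t => exact ⟨t.foldl min a, PySem.List.min?_id_cons a t⟩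
      have hvmem : v ∈ pq := PySem.List.min?_mem hv
      have hvmin : ∀ y ∈ pq, v ≤ y := PySem.List.min?_isMin hv
      have hmle : ∀ y ∈ (m :: rest), m ≤ y := by
        intro y hy
        rcases List.mem_cons.mp hy with hy | hy
        · subst hy; exact le_refl _
        · exact (List.pairwise_cons.mp hpw).1 y hy
      have hvm : v = m := by
        have h1 : v ≤ m := hvmin m (hperm.mem_iff.mp (List.mem_cons_self))
        have h2 : m ≤ v := hmle v (hperm.mem_iff.mpr hvmem)
        omega
      subst hvm
      have hrem : PySem.List.remove? pq v = some (pq.erase v) :=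
        PySem.List.remove?_eq_some_erase pq v hvmem
      -- one step of A
      have hstepA : reduceGiftsStep k threshold (mi, pq, s) p
          = ((if threshold < s then mi + 1 else mi), pq.erase v ++ [p], s - v + p) := by
        simp only [reduceGiftsStep, if_pos hcond, hv, hrem, Option.getD_some]
      -- one step of B
      have hstepB : reduceGiftsAltStep (v :: rest, s, init ++ [s]) p
          = (insertAsc rest p, s + p - v, (init ++ [s]) ++ [s + p - v]) := by
        simp [reduceGiftsAltStep]
      simp only [List.foldl_cons, hstepA, hstepB]
      have h1 : (pq.erase v).Perm rest := by
        have := (hperm.erase v).symm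
        simpa [List.erase_cons_head] using this
      have hperm' : (insertAsc rest p).Perm (pq.erase v ++ [p]) := by
        refine (insertAsc_perm rest p).trans ?_
        refine List.Perm.trans ?_ (List.perm_append_singleton p (pq.erase v)).symm
        exact (h1.symm).cons p
      have hpw' : (insertAsc rest p).Pairwise (· ≤ ·) :=
        insertAsc_pairwise rest p (List.Pairwise.of_cons hpw)
      have hlen' : ((insertAsc rest p).length : Int) = k := by
        have := (insertAsc_perm rest p).length_eq
        simp only [List.length_cons] at this hlen
        push_cast [this] at *
        omega
      have hmi' : (if threshold < s then mi + 1 else mi)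
          = ((init ++ [s]).countP (fun v => decide (threshold < v)) : Int) - 1 := by
        rw [List.countP_append]
        by_cases hs : threshold < s
        · simp [hs, hmi]
        · simp [hs, hmi]
      have hsw : s - v + p = s + p - v := by ring
      rw [hsw]
      exact ih (insertAsc rest p) (pq.erase v ++ [p]) _ (s + p - v) (init ++ [s])
        hperm' hpw' hlen' hk hmi'

theorem reduceGifts_spec : Claim_equal_reduceGifts := by
  intro prices k threshold _ hpre
  unfold Spec_reduceGifts
  by_cases hlt : (prices.length : Int) < k
  · simp [reduceGifts, reduceGifts_alt, hlt]
  · rcases hpre with hnil | hk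
    · -- prices = [], hence k ≤ 0: both fold over nothing
      subst hnil
      simp only [List.length_nil, Nat.cast_zero] at hlt
      simp only [reduceGifts, reduceGifts_alt, List.length_nil, Nat.cast_zero, if_neg hlt]
      simp [PySem.List.slice, PySem.List.sorted]
      by_cases hs : threshold < 0
      · simp [hs]
      · simp [hs]
    · -- main case: 1 ≤ k ≤ len prices
      have hk0 : (0:Int) ≤ k := by omega
      have hkk : k = ((k.toNat : Nat) : Int) := (Int.toNat_of_nonneg hk0).symm
      have hkn : k.toNat ≤ prices.length := by omega
      simp only [reduceGifts, reduceGifts_alt, if_neg hlt]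
      rw [hkk, PySem.List.slice_to_natCast, PySem.List.slice_from_natCast]
      set F := prices.take k.toNat with hF
      set R := prices.drop k.toNat with hR
      have hsplit : prices = F ++ R := (List.take_append_drop k.toNat prices).symm
      have hFlen : F.length = k.toNat := by
        simp [hF, List.length_take, Nat.min_eq_left hkn]
      set kept := PySem.List.sorted F (fun x => x) false with hkept
      have hkperm : kept.Perm F := PySem.List.sorted_perm F (fun x => x) false
      have hkpw : kept.Pairwise (· ≤ ·) := by simpa using PySem.List.sorted_pairwise F (fun x => x)
      have hklen : ((kept.length : Nat) : Int) = ((k.toNat : Nat) : Int) := by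
        rw [hkperm.length_eq, hFlen]
      have hsum : kept.sum = F.sum := hkperm.sum_eq
      conv_lhs => rw [hsplit]
      rw [List.foldl_append]
      rw [fillA ((k.toNat : Nat) : Int) threshold F (-1) 0 [] (by simp [hFlen])]
      have hfin := phase2 ((k.toNat : Nat) : Int) threshold R kept F (-1) F.sum []
        hkperm hkpw hklen (by omega) (by simp)
      simp only [List.nil_append] at hfin
      simpa [hsum] using hfin
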